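-- pv_equiv track=rewrite | github.com/luizmont5/Exerc-cios-Computabilidade-e-Complexidade-de-algoritmo | 22 questão/exercicio22.py | afd_diferenca_multiplos_de_3
-- ===== SOURCE A (Python) =====
-- def afd_diferenca_multiplos_de_3(entrada):
--     estado_atual = 0
--
--     for simbolo in entrada:
--         if simbolo == 'a':
--             estado_atual = (estado_atual + 1) % 3
--         elif simbolo == 'b':
--             estado_atual = (estado_atual - 1) % 3
--
--     return estado_atual == 0
-- ===== SOURCE B (Python) =====
-- def afd_diferenca_multiplos_de_3(entrada):
--     # Closed form: the DFA accepts iff (#a - #b) is divisible by 3.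
--     return (entrada.count('a') - entrada.count('b')) % 3 == 0
-- ===== Notes on version B (the rewrite author's own statement) =====
-- stated objective: simpler
-- what changed: Replaces the per-symbol mod-3 state-machine loop with the closed form: count 'a's and 'b's once with str.count and test (#a - #b) % 3 == 0.
import Mathlib
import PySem

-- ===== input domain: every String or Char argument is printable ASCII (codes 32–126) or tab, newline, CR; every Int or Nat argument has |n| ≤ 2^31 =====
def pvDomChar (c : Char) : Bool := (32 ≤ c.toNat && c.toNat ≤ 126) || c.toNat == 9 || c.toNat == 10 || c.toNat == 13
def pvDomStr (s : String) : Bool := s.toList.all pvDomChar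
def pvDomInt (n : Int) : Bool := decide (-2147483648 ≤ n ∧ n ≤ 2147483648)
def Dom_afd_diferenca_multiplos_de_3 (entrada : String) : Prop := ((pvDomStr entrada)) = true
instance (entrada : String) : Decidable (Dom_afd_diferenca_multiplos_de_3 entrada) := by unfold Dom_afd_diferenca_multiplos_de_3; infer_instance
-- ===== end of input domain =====

-- B replaces the per-symbol mod-3 state machine with the closed form (#a - #b) % 3 == 0 (simpler; same cost).

-- ===== PORT A =====
def afd_diferenca_multiplos_de_3 (entrada : String) : Bool :=
  let estado_final := entrada.toList.foldl (fun estado_atual simbolo =>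
    if simbolo == 'a' then PySem.Int.mod (estado_atual + 1) 3
    else if simbolo == 'b' then PySem.Int.mod (estado_atual - 1) 3
    else estado_atual) (0 : Int)
  estado_final == 0

-- ===== PORT B =====
def afd_diferenca_multiplos_de_3_alt (entrada : String) : Bool :=
  PySem.Int.mod ((PySem.Str.count entrada "a" : Int) - (PySem.Str.count entrada "b" : Int)) 3 == 0

-- ===== PRECONDITION & SPEC =====
def Spec_afd_diferenca_multiplos_de_3 (entrada : String) (out : Bool) : Prop := out = afd_diferenca_multiplos_de_3_alt entrada
instance (entrada : String) (out : Bool) : Decidable (Spec_afd_diferenca_multiplos_de_3 entrada out) := by unfold Spec_afd_diferenca_multiplos_de_3; infer_instance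

-- ===== CLAIM (what is proved, stated in full; the proofs are below) =====
def Claim_equal_afd_diferenca_multiplos_de_3 : Prop := ∀ (entrada : String), Dom_afd_diferenca_multiplos_de_3 entrada → Spec_afd_diferenca_multiplos_de_3 entrada (afd_diferenca_multiplos_de_3 entrada)

-- ===== LEMMAS AND PROOFS =====

theorem count_go_single (c : Char) (l : List Char) (fuel acc : Nat) (h : l.length ≤ fuel) :
    PySem.Chars.count.go [c] fuel l acc = acc + l.count c := by
  induction l generalizing fuel acc with
  | nil => cases fuel <;> simp [PySem.Chars.count.go]
  | cons hd tl ih =>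
    cases fuel with
    | zero => simp at h
    | succ f =>
      simp only [List.length_cons, Nat.add_le_add_iff_right] at h
      by_cases hc : c = hd
      · subst hc
        simp [PySem.Chars.count.go, List.isPrefixOf, ih f (acc + 1) h]
        omega
      · have : (c == hd) = false := by simpa using hc
        have h2 : (hd == c) = false := by simpa using fun e => hc e.symm
        simp [PySem.Chars.count.go, List.isPrefixOf, this, ih f acc h, List.count_cons, h2]
theorem count_single (c : Char) (l : List Char) :
    PySem.Chars.count l [c] = l.count c := by
  simp [PySem.Chars.count, count_go_single c l l.length 0 le_rfl]

theorem fold_state (l : List Char) (s : Int) :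
    l.foldl (fun estado_atual simbolo =>
      if simbolo == 'a' then PySem.Int.mod (estado_atual + 1) 3
      else if simbolo == 'b' then PySem.Int.mod (estado_atual - 1) 3
      else estado_atual) (PySem.Int.mod s 3)
    = PySem.Int.mod (s + (l.count 'a' : Int) - (l.count 'b' : Int)) 3 := by
  induction l generalizing s with
  | nil => simp
  | cons hd tl ih =>
    simp only [List.foldl_cons, List.count_cons]
    by_cases ha : hd = 'a'
    · subst ha
      have e : PySem.Int.mod (PySem.Int.mod s 3 + 1) 3 = PySem.Int.mod (s + 1) 3 := by
        simp only [PySem.Int.mod_eq_emod_of_pos (by norm_num : (0:Int) < 3)]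
        omega
      rw [if_pos (show (('a':Char) == 'a') = true from rfl), e, ih (s + 1)]
      congr 1
      push_cast
      norm_num
      ring
    · by_cases hb : hd = 'b'
      · subst hb
        have e : PySem.Int.mod (PySem.Int.mod s 3 - 1) 3 = PySem.Int.mod (s - 1) 3 := by
          simp only [PySem.Int.mod_eq_emod_of_pos (by norm_num : (0:Int) < 3)]
          omega
        rw [if_neg (show ¬ ((('b':Char) == 'a') = true) by decide),
            if_pos (show (('b':Char) == 'b') = true from rfl), e, ih (s - 1)]
        congr 1
        push_cast
        norm_num
        ring
      · have h1 : (hd == 'a') = false := by simpa using ha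
        have h2 : (hd == 'b') = false := by simpa using hb
        rw [if_neg (by simp [h1]), if_neg (by simp [h2]), ih s]
        simp [ha, hb]

-- ===== VERDICT (by name: the statement is the Claim_ definition above) =====
theorem afd_diferenca_multiplos_de_3_spec : Claim_equal_afd_diferenca_multiplos_de_3 := by
  intro entrada _
  unfold Spec_afd_diferenca_multiplos_de_3 afd_diferenca_multiplos_de_3 afd_diferenca_multiplos_de_3_alt
  have h0 : (0 : Int) = PySem.Int.mod 0 3 := by decide
  rw [h0, fold_state entrada.toList 0]
  simp [PySem.Str.count, count_single]
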